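-- pv_equiv track=rewrite | github.com/LuisGarayF/shipcal_cl | Simulacion/simulation_functions.py | monthly_work_hours
-- ===== SOURCE A (Python) =====
-- def monthly_work_hours(month, t_start, t_end, work_day_list):
--     if t_start == t_end:
--         daily_working_hours = 24
--     else:
--         if t_end > t_start:
--             daily_working_hours = t_end - t_start
--         else:
--             daily_working_hours = 24 - t_start + t_end
--     work_hours = 0
--     for day in range(1,366):
--         if month_from_day(day) == month and week_day_from_day(day) in work_day_list:
--             work_hours = work_hours + daily_working_hours
--     return work_hours
--
-- def week_day_from_day(day):
--     week_day = day%7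
--     if week_day == 1:
--         return 'Monday'
--     if week_day == 2:
--         return 'Tuesday'
--     if week_day == 3:
--         return 'Wednesday'
--     if week_day == 4:
--         return 'Thursday'
--     if week_day == 5:
--         return 'Friday'
--     if week_day == 6:
--         return 'Saturday'
--     if week_day == 0:
--         return 'Sunday'
--
-- def month_from_day(day):
--     if day >= 1 and day <= 31:
--         return 'January'
--     elif day >= 32 and day <= 59:
--         return 'February'
--     elif day >= 60 and day <= 90:
--         return 'March'
--     elif day >= 91 and day <= 120:
--         return 'April'
--     elif day >= 121 and day <= 151:
--         return 'May'
--     elif day >= 152 and day <= 181: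
--         return 'June'
--     elif day >= 182 and day <= 212:
--         return 'July'
--     elif day >= 213 and day <= 243:
--         return 'August'
--     elif day >= 244 and day <= 273:
--         return 'September'
--     elif day >= 274 and day <= 304:
--         return 'October'
--     elif day >= 305 and day <= 334:
--         return 'November'
--     elif day >= 335 and day <= 365:
--         return 'December'
--     else:
--         raise ValueError('Día fuera de rango')
-- ===== SOURCE B (Python) =====
-- MONTH_RANGES = {
--     'January': (1, 31), 'February': (32, 59), 'March': (60, 90),
--     'April': (91, 120), 'May': (121, 151), 'June': (152, 181),
--     'July': (182, 212), 'August': (213, 243), 'September': (244, 273),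
--     'October': (274, 304), 'November': (305, 334), 'December': (335, 365),
-- }
--
-- WEEKDAY_NAMES = ['Sunday', 'Monday', 'Tuesday', 'Wednesday', 'Thursday', 'Friday', 'Saturday']
--
-- def monthly_work_hours(month, t_start, t_end, work_day_list):
--     if t_start == t_end:
--         daily_working_hours = 24
--     else:
--         if t_end > t_start:
--             daily_working_hours = t_end - t_start
--         else:
--             daily_working_hours = 24 - t_start + t_end
--     rng = MONTH_RANGES.get(month)
--     if rng is None:
--         return 0
--     first, last = rng
--     count = 0
--     for day in range(first, last + 1):
--         if WEEKDAY_NAMES[day % 7] in work_day_list: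
--             count = count + 1
--     return count * daily_working_hours
-- ===== Notes on version B (the rewrite author's own statement) =====
-- stated objective: alternative
-- what changed: B replaces A's per-call scan of all 365 days (recomputing month_from_day for each) with a month->(first_day,last_day) table lookup, counts qualifying weekdays only over that month's range, and multiplies the count by the daily hours; unknown months miss the table and return 0 like A.
import Mathlib
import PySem

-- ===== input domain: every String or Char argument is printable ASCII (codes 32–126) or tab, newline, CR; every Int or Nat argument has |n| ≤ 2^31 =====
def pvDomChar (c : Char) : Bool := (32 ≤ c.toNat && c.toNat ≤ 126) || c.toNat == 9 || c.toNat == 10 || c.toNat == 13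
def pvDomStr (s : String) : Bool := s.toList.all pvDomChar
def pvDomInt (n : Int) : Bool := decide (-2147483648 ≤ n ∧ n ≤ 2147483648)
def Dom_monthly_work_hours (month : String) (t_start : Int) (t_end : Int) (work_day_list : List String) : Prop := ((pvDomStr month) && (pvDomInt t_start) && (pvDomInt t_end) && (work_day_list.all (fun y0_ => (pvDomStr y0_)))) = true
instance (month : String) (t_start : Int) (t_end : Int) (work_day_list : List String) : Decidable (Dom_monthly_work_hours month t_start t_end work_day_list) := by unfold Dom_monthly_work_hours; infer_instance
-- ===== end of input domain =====

-- B replaces A's scan of all 365 days with a month→(first,last) table lookup and a count over that month's days only.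

-- ===== PORT A =====
def week_day_from_day (day : Int) : String :=
  let week_day := PySem.Int.mod day 7
  if week_day = 1 then "Monday"
  else if week_day = 2 then "Tuesday"
  else if week_day = 3 then "Wednesday"
  else if week_day = 4 then "Thursday"
  else if week_day = 5 then "Friday"
  else if week_day = 6 then "Saturday"
  else "Sunday"  -- the week_day == 0 case; day % 7 ∈ 0..6, so the chain is exhaustive

def month_from_day (day : Int) : String :=
  if 1 ≤ day ∧ day ≤ 31 then "January"
  else if 32 ≤ day ∧ day ≤ 59 then "February"
  else if 60 ≤ day ∧ day ≤ 90 then "March"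
  else if 91 ≤ day ∧ day ≤ 120 then "April"
  else if 121 ≤ day ∧ day ≤ 151 then "May"
  else if 152 ≤ day ∧ day ≤ 181 then "June"
  else if 182 ≤ day ∧ day ≤ 212 then "July"
  else if 213 ≤ day ∧ day ≤ 243 then "August"
  else if 244 ≤ day ∧ day ≤ 273 then "September"
  else if 274 ≤ day ∧ day ≤ 304 then "October"
  else if 305 ≤ day ∧ day ≤ 334 then "November"
  else if 335 ≤ day ∧ day ≤ 365 then "December"
  else ""  -- Python raises ValueError here; unreachable (every caller passes day ∈ 1..365)

def monthly_work_hours (month : String) (t_start : Int) (t_end : Int) (work_day_list : List String) : Int :=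
  let daily_working_hours : Int :=
    if t_start = t_end then 24
    else if t_end > t_start then t_end - t_start
    else 24 - t_start + t_end
  (PySem.List.pyRange 1 366 1).foldl
    (fun work_hours day =>
      if month_from_day day == month && work_day_list.contains (week_day_from_day day) then
        work_hours + daily_working_hours
      else work_hours) 0

-- ===== PORT B =====
def pvMonthRanges : PySem.Dict String (Int × Int) :=
  PySem.Dict.ofList
    [("January", (1, 31)), ("February", (32, 59)), ("March", (60, 90)),
     ("April", (91, 120)), ("May", (121, 151)), ("June", (152, 181)),
     ("July", (182, 212)), ("August", (213, 243)), ("September", (244, 273)),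
     ("October", (274, 304)), ("November", (305, 334)), ("December", (335, 365))]

def pvWeekdayNames : List String :=
  ["Sunday", "Monday", "Tuesday", "Wednesday", "Thursday", "Friday", "Saturday"]

def monthly_work_hours_alt (month : String) (t_start : Int) (t_end : Int) (work_day_list : List String) : Int :=
  let daily_working_hours : Int :=
    if t_start = t_end then 24
    else if t_end > t_start then t_end - t_start
    else 24 - t_start + t_end
  match pvMonthRanges.get? month with
  | none => 0
  | some (first, last) =>
      ((PySem.List.pyRange first (last + 1) 1).foldl
        (fun count day =>
          -- WEEKDAY_NAMES[day % 7]: day % 7 ∈ 0..6 so the index is always in range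
          if work_day_list.contains (PySem.List.pyGetD pvWeekdayNames (PySem.Int.mod day 7) "") then
            count + 1
          else count) 0) * daily_working_hours

-- ===== PRECONDITION & SPEC =====
def Spec_monthly_work_hours (month : String) (t_start : Int) (t_end : Int) (work_day_list : List String) (out : Int) : Prop := out = monthly_work_hours_alt month t_start t_end work_day_list
instance (month : String) (t_start : Int) (t_end : Int) (work_day_list : List String) (out : Int) : Decidable (Spec_monthly_work_hours month t_start t_end work_day_list out) := by unfold Spec_monthly_work_hours; infer_instance

-- ===== CLAIM (what is proved, stated in full; the proofs are below) =====
def Claim_equal_monthly_work_hours : Prop := ∀ (month : String) (t_start : Int) (t_end : Int) (work_day_list : List String), Dom_monthly_work_hours month t_start t_end work_day_list → Spec_monthly_work_hours month t_start t_end work_day_list (monthly_work_hours month t_start t_end work_day_list)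

-- ===== LEMMAS AND PROOFS =====

-- B's weekday lookup computes exactly A's weekday name
theorem weekday_lookup_eq (day : Int) :
    PySem.List.pyGetD pvWeekdayNames (PySem.Int.mod day 7) "" = week_day_from_day day := by
  have hm : PySem.Int.mod day 7 = day % 7 := PySem.Int.mod_eq_emod_of_pos (by norm_num)
  unfold week_day_from_day
  rw [hm]
  have : day % 7 = 0 ∨ day % 7 = 1 ∨ day % 7 = 2 ∨ day % 7 = 3 ∨ day % 7 = 4 ∨
      day % 7 = 5 ∨ day % 7 = 6 := by omega
  rcases this with h|h|h|h|h|h|h <;> rw [h] <;> simp [pvWeekdayNames, PySem.List.pyGetD]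

-- month_from_day d == m  ↔  d in m's day range, for each month name m (one split for all twelve)
set_option maxHeartbeats 2000000 in
theorem month_beq_all (d : Int) :
    (month_from_day d == "January") = decide (1 ≤ d ∧ d ≤ 31)
    ∧ (month_from_day d == "February") = decide (32 ≤ d ∧ d ≤ 59)
    ∧ (month_from_day d == "March") = decide (60 ≤ d ∧ d ≤ 90)
    ∧ (month_from_day d == "April") = decide (91 ≤ d ∧ d ≤ 120)
    ∧ (month_from_day d == "May") = decide (121 ≤ d ∧ d ≤ 151)
    ∧ (month_from_day d == "June") = decide (152 ≤ d ∧ d ≤ 181)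
    ∧ (month_from_day d == "July") = decide (182 ≤ d ∧ d ≤ 212)
    ∧ (month_from_day d == "August") = decide (213 ≤ d ∧ d ≤ 243)
    ∧ (month_from_day d == "September") = decide (244 ≤ d ∧ d ≤ 273)
    ∧ (month_from_day d == "October") = decide (274 ≤ d ∧ d ≤ 304)
    ∧ (month_from_day d == "November") = decide (305 ≤ d ∧ d ≤ 334)
    ∧ (month_from_day d == "December") = decide (335 ≤ d ∧ d ≤ 365)
    ∧ (1 ≤ d → d ≤ 365 → month_from_day d ∈ ["January", "February", "March", "April", "May",
        "June", "July", "August", "September", "October", "November", "December"]) := by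
  unfold month_from_day
  repeat' split
  all_goals
    simp only [String.reduceBEq, beq_self_eq_true, Bool.true_eq, Bool.false_eq,
      decide_eq_true_eq, decide_eq_false_iff_not, not_and, not_le, List.mem_cons,
      List.not_mem_nil, or_false, false_or, true_or, or_true,
      String.reduceEq, and_true, imp_true_iff] <;> omega

theorem month_from_day_mem (d : Int) (h1 : 1 ≤ d) (h2 : d ≤ 365) :
    month_from_day d ∈ ["January", "February", "March", "April", "May", "June", "July",
      "August", "September", "October", "November", "December"] :=
  (month_beq_all d).2.2.2.2.2.2.2.2.2.2.2.2 h1 h2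

-- counting over the full year with a range guard = counting over that range
theorem countP_year_range (a b : Int) (q : Int → Bool) (h1 : 1 ≤ a) (h2 : a ≤ b + 1) (h3 : b + 1 ≤ 366) :
    (PySem.List.pyRange 1 366 1).countP (fun d => decide (a ≤ d ∧ d ≤ b) && q d)
      = (PySem.List.pyRange a (b + 1) 1).countP q := by
  rw [PySem.List.pyRange_one_append 1 a 366 (by omega) (by omega),
      PySem.List.pyRange_one_append a (b + 1) 366 h2 h3,
      List.countP_append, List.countP_append]
  have z1 : (PySem.List.pyRange 1 a 1).countP (fun d => decide (a ≤ d ∧ d ≤ b) && q d) = 0 := by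
    rw [List.countP_eq_zero]
    intro x hx
    rw [PySem.List.mem_pyRange_one] at hx
    simp; omega
  have z2 : (PySem.List.pyRange (b + 1) 366 1).countP (fun d => decide (a ≤ d ∧ d ≤ b) && q d) = 0 := by
    rw [List.countP_eq_zero]
    intro x hx
    rw [PySem.List.mem_pyRange_one] at hx
    simp; omega
  have c : (PySem.List.pyRange a (b + 1) 1).countP (fun d => decide (a ≤ d ∧ d ≤ b) && q d)
      = (PySem.List.pyRange a (b + 1) 1).countP q := by
    apply List.countP_congr
    intro x hx
    rw [PySem.List.mem_pyRange_one] at hx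
    simp; omega
  omega

-- A's year loop for a known month = count over the month's range times the daily hours
theorem month_case (m : String) (a b : Int) (h : Int) (q : Int → Bool)
    (hm : ∀ d, (month_from_day d == m) = decide (a ≤ d ∧ d ≤ b))
    (h1 : 1 ≤ a) (h2 : a ≤ b + 1) (h3 : b + 1 ≤ 366) :
    (PySem.List.pyRange 1 366 1).foldl
      (fun acc day => if month_from_day day == m && q day then acc + h else acc) 0
      = ((PySem.List.pyRange a (b + 1) 1).foldl
          (fun count day => if q day then count + 1 else count) 0) * h := by
  simp only [hm]
  rw [PySem.List.foldl_if_eq_foldl_filter,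
      PySem.List.foldl_add (g := fun _ => h),
      PySem.List.foldl_if_add_one, PySem.List.sum_map_const_int,
      ← List.countP_eq_length_filter, countP_year_range a b q h1 h2 h3]
  ring

theorem monthly_work_hours_eq (month : String) (t_start t_end : Int) (work_day_list : List String) :
    monthly_work_hours month t_start t_end work_day_list
      = monthly_work_hours_alt month t_start t_end work_day_list := by
  unfold monthly_work_hours monthly_work_hours_alt
  simp only [weekday_lookup_eq]
  set h : Int := if t_start = t_end then 24 else if t_end > t_start then t_end - t_start
    else 24 - t_start + t_end with hh
  set q : Int → Bool := fun day => work_day_list.contains (week_day_from_day day) with hq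
  by_cases hJan : month = "January"
  · subst hJan; exact month_case _ 1 31 h q (fun d => (month_beq_all d).1) (by omega) (by omega) (by omega)
  by_cases hFeb : month = "February"
  · subst hFeb; exact month_case _ 32 59 h q (fun d => (month_beq_all d).2.1) (by omega) (by omega) (by omega)
  by_cases hMar : month = "March"
  · subst hMar; exact month_case _ 60 90 h q (fun d => (month_beq_all d).2.2.1) (by omega) (by omega) (by omega)
  by_cases hApr : month = "April"
  · subst hApr; exact month_case _ 91 120 h q (fun d => (month_beq_all d).2.2.2.1) (by omega) (by omega) (by omega)
  by_cases hMay : month = "May"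
  · subst hMay; exact month_case _ 121 151 h q (fun d => (month_beq_all d).2.2.2.2.1) (by omega) (by omega) (by omega)
  by_cases hJun : month = "June"
  · subst hJun; exact month_case _ 152 181 h q (fun d => (month_beq_all d).2.2.2.2.2.1) (by omega) (by omega) (by omega)
  by_cases hJul : month = "July"
  · subst hJul; exact month_case _ 182 212 h q (fun d => (month_beq_all d).2.2.2.2.2.2.1) (by omega) (by omega) (by omega)
  by_cases hAug : month = "August"
  · subst hAug; exact month_case _ 213 243 h q (fun d => (month_beq_all d).2.2.2.2.2.2.2.1) (by omega) (by omega) (by omega)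
  by_cases hSep : month = "September"
  · subst hSep; exact month_case _ 244 273 h q (fun d => (month_beq_all d).2.2.2.2.2.2.2.2.1) (by omega) (by omega) (by omega)
  by_cases hOct : month = "October"
  · subst hOct; exact month_case _ 274 304 h q (fun d => (month_beq_all d).2.2.2.2.2.2.2.2.2.1) (by omega) (by omega) (by omega)
  by_cases hNov : month = "November"
  · subst hNov; exact month_case _ 305 334 h q (fun d => (month_beq_all d).2.2.2.2.2.2.2.2.2.2.1) (by omega) (by omega) (by omega)
  by_cases hDec : month = "December"
  · subst hDec; exact month_case _ 335 365 h q (fun d => (month_beq_all d).2.2.2.2.2.2.2.2.2.2.2.1) (by omega) (by omega) (by omega)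
  -- month is not one of the twelve names: A sums nothing, B's lookup misses
  have hget : pvMonthRanges.get? month = none := by
    have hk : pvMonthRanges.keys = ["January", "February", "March", "April", "May", "June",
        "July", "August", "September", "October", "November", "December"] := by rfl
    rw [PySem.Dict.get?_eq_none_iff_not_mem_keys, hk]
    simp only [List.mem_cons, List.not_mem_nil, or_false]
    tauto
  rw [hget]
  have : (PySem.List.pyRange 1 366 1).foldl
      (fun acc day => if month_from_day day == month && q day then acc + h else acc) 0
      = (PySem.List.pyRange 1 366 1).foldl (fun acc _ => acc) 0 := by
    apply PySem.List.foldl_congr_mem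
    intro acc x hx
    rw [PySem.List.mem_pyRange_one] at hx
    have hmem := month_from_day_mem x (by omega) (by omega)
    have : (month_from_day x == month) = false := by
      simp only [List.mem_cons, List.not_mem_nil, or_false] at hmem
      rcases hmem with h'|h'|h'|h'|h'|h'|h'|h'|h'|h'|h'|h' <;> rw [h'] <;>
        simp [beq_eq_false_iff_ne] <;>
        first
          | exact fun hh => hJan hh.symm | exact fun hh => hFeb hh.symm
          | exact fun hh => hMar hh.symm | exact fun hh => hApr hh.symm
          | exact fun hh => hMay hh.symm | exact fun hh => hJun hh.symm
          | exact fun hh => hJul hh.symm | exact fun hh => hAug hh.symm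
          | exact fun hh => hSep hh.symm | exact fun hh => hOct hh.symm
          | exact fun hh => hNov hh.symm | exact fun hh => hDec hh.symm
    simp [this]
  rw [this, PySem.List.foldl_ignore]

-- ===== VERDICT (by name: the statement is the Claim_ definition above) =====
theorem monthly_work_hours_spec : Claim_equal_monthly_work_hours := by
  intro month t_start t_end work_day_list _
  unfold Spec_monthly_work_hours
  exact monthly_work_hours_eq month t_start t_end work_day_list
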